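-- pv_equiv track=rewrite | github.com/jprice8/interview-prep | heaps/findLeastNumberOfUniqueInts.py | findLeast
-- ===== SOURCE A (Python) =====
-- from collections import Counter
--
-- def findLeast(arr, k):
--     c = Counter(arr)
--     cnt, remaining = Counter(c.values()), len(c)
--     for key in range(1, len(arr) + 1):
--         if k >= key * cnt[key]:
--             k -= key * cnt[key]
--             remaining -= cnt[key]
--         else:
--             return remaining - k // key
--     return remaining
-- ===== SOURCE B (Python) =====
-- from collections import Counter
--
-- def findLeast(arr, k):
--     freqs = sorted(Counter(arr).values())
--     remaining = len(freqs)
--     for f in freqs: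
--         if k >= f:
--             k -= f
--             remaining -= 1
--         else:
--             break
--     return remaining
-- ===== Notes on version B (the rewrite author's own statement) =====
-- stated objective: alternative
-- what changed: B sorts the distinct elements' frequencies and removes them greedily one unique value at a time, instead of A's scan over every candidate frequency 1..len(arr) with a Counter of counts and floor-division for partial groups.
-- intended difference: On nonempty arr with k < 0, A returns the number of distinct elements minus k (i.e. MORE unique ints than the array contains, an artefact of floor division in its else branch), while B returns the number of distinct elements unchanged, the intended result of removing nothing for a nonpositive removal budget. — e.g. on findLeast([1, 1], -3): A returns 4, B returns 1
import Mathlib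
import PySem

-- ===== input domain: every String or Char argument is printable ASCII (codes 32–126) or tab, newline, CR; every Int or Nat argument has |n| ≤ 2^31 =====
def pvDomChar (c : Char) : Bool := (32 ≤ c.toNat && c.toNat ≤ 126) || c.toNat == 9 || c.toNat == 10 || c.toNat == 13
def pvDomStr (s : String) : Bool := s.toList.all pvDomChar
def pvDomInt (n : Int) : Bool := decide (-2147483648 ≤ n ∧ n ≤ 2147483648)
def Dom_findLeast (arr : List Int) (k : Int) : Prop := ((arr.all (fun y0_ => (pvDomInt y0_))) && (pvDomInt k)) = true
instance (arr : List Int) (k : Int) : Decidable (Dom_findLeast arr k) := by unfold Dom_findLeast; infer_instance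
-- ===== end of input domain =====

-- B replaces A's scan over every candidate frequency 1..len(arr) by a greedy pass over the
-- sorted list of the distinct elements' frequencies (alternative decomposition, similar cost).


-- ===== PORT A =====
-- the 'for key in range(...)' loop with its early return
def findLeastLoopA (cnt : PySem.Dict Int Int) : List Int → Int → Int → Int
  | [], _, remaining => remaining
  | key :: rest, k, remaining =>
    if key * cnt.getD key 0 ≤ k then
      findLeastLoopA cnt rest (k - key * cnt.getD key 0) (remaining - cnt.getD key 0)
    else
      remaining - PySem.Int.floordiv k key

def findLeast (arr : List Int) (k : Int) : Int :=
  let c := PySem.Dict.counter arr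
  let cnt := PySem.Dict.counter c.values
  let remaining : Int := c.size
  findLeastLoopA cnt (PySem.List.pyRange 1 ((arr.length : Int) + 1) 1) k remaining

-- ===== PORT B =====
-- the 'for f in freqs' loop with its break
def findLeastLoopB : List Int → Int → Int → Int
  | [], _, remaining => remaining
  | f :: rest, k, remaining =>
    if f ≤ k then findLeastLoopB rest (k - f) (remaining - 1) else remaining

def findLeast_alt (arr : List Int) (k : Int) : Int :=
  let freqs := PySem.List.sorted (PySem.Dict.counter arr).values (fun x => x) false
  findLeastLoopB freqs k (freqs.length : Int)

-- ===== PRECONDITION & SPEC =====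
-- On nonempty arr with k < 0, A returns the number of distinct elements minus k (more unique
-- ints than the array contains, an artefact of floor division in its else branch), while B
-- returns the number of distinct elements unchanged — the intended result of removing nothing.
def D_findLeast (arr : List Int) (k : Int) : Prop := k < 0 ∧ arr ≠ []
instance (arr : List Int) (k : Int) : Decidable (D_findLeast arr k) := by unfold D_findLeast; infer_instance

def Spec_findLeast (arr : List Int) (k : Int) (out : Int) : Prop := ¬ D_findLeast arr k → out = findLeast_alt arr k
instance (arr : List Int) (k : Int) (out : Int) : Decidable (Spec_findLeast arr k out) := by unfold Spec_findLeast; infer_instance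

def pvDiffWitness_findLeast : List Int × Int := ([1, 1], -3)
def pvDiffWitnessOut_findLeast : Int × Int := (4, 1)

-- ===== CLAIM (what is proved, stated in full; the proofs are below) =====
def Claim_unchanged_findLeast : Prop := ∀ (arr : List Int) (k : Int), Dom_findLeast arr k → Spec_findLeast arr k (findLeast arr k)
def Claim_changed_findLeast : Prop := Dom_findLeast (pvDiffWitness_findLeast.1) (pvDiffWitness_findLeast.2) ∧ D_findLeast (pvDiffWitness_findLeast.1) (pvDiffWitness_findLeast.2) ∧ findLeast (pvDiffWitness_findLeast.1) (pvDiffWitness_findLeast.2) = pvDiffWitnessOut_findLeast.1 ∧ findLeast_alt (pvDiffWitness_findLeast.1) (pvDiffWitness_findLeast.2) = pvDiffWitnessOut_findLeast.2 ∧ pvDiffWitnessOut_findLeast.1 ≠ pvDiffWitnessOut_findLeast.2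
def Claim_exact_findLeast : Prop := ∀ (arr : List Int) (k : Int), Dom_findLeast arr k → D_findLeast arr k → findLeast arr k ≠ findLeast_alt arr k

-- ===== LEMMAS AND PROOFS =====

-- B's loop on a block of equal frequencies m, followed by anything.
lemma loopB_replicate (c : Nat) : ∀ (m k r : Int) (t : List Int), 0 ≤ k → 1 ≤ m →
    findLeastLoopB (List.replicate c m ++ t) k r =
      if m * (c : Int) ≤ k then findLeastLoopB t (k - m * c) (r - c)
      else r - PySem.Int.floordiv k m := by
  induction c with
  | zero =>
    intro m k r t hk hm
    simp [hk]
  | succ c ih =>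
    intro m k r t hk hm
    rw [List.replicate_succ, List.cons_append]
    push_cast
    by_cases hmk : m ≤ k
    · rw [findLeastLoopB, if_pos hmk, ih m (k - m) (r - 1) t (by omega) hm]
      by_cases h2 : m * ((c : Int) + 1) ≤ k
      · rw [if_pos (by nlinarith), if_pos h2,
          show k - m - m * (c : Int) = k - m * ((c : Int) + 1) from by ring,
          show r - 1 - (c : Int) = r - ((c : Int) + 1) from by ring]
      · rw [if_neg (fun h => h2 (by nlinarith)), if_neg h2]
        have hstep : PySem.Int.floordiv k m = PySem.Int.floordiv (k - m) m + 1 := by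
          rw [PySem.Int.floordiv_eq_ediv_of_pos (by omega),
            PySem.Int.floordiv_eq_ediv_of_pos (by omega)]
          conv_lhs => rw [show k = (k - m) + 1 * m from by ring]
          rw [Int.add_mul_ediv_right _ _ (by omega : m ≠ 0)]
        omega
    · rw [findLeastLoopB, if_neg hmk]
      have hc0 : (0 : Int) ≤ (c : Int) := Int.natCast_nonneg c
      rw [if_neg (by nlinarith)]
      have h0 : PySem.Int.floordiv k m = 0 := by
        rw [PySem.Int.floordiv_eq_iff_of_pos (by omega)]
        omega
      omega

-- a sorted list with all elements ≥ m splits as a block of m's followed by elements ≥ m+1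
lemma sorted_split (m : Int) : ∀ (s : List Int), s.Pairwise (· ≤ ·) → (∀ x ∈ s, m ≤ x) →
    ∃ t, s = List.replicate (s.count m) m ++ t ∧ t.Pairwise (· ≤ ·) ∧
      (∀ x ∈ t, m + 1 ≤ x) ∧ (∀ key, key ≠ m → t.count key = s.count key) := by
  intro s
  induction s with
  | nil => intro _ _; exact ⟨[], by simp⟩
  | cons a s ih =>
    intro hp hb
    have hpa := (List.pairwise_cons.mp hp).1
    have hps := (List.pairwise_cons.mp hp).2
    by_cases ham : a = m
    · subst ham
      obtain ⟨t, hs, hpt, hbt, hct⟩ := ih hps (fun x hx => hb x (List.mem_cons_of_mem _ hx))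
      refine ⟨t, ?_, hpt, hbt, ?_⟩
      · rw [List.count_cons_self, List.replicate_succ, List.cons_append]
        exact congrArg (a :: ·) hs
      · intro key hk
        have hka : ¬ (a = key) := fun h => hk h.symm
        rw [hct key hk, List.count_cons]
        simp [hka]
    · have ham' : m + 1 ≤ a := by
        have := hb a (List.mem_cons_self)
        omega
      refine ⟨a :: s, ?_, hp, ?_, ?_⟩
      · have : (a :: s).count m = 0 := by
          rw [List.count_eq_zero]
          intro hm
          rcases List.mem_cons.mp hm with h | h
          · exact ham h.symm
          · have := hpa m h; omega
        simp [this]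
      · intro x hx
        rcases List.mem_cons.mp hx with h | h
        · omega
        · have := hpa x h; omega
      · intro _ _; rfl

-- main loop correspondence: A over keys m..m+fuel-1 against B over the sorted frequency list
lemma loop_main (fuel : Nat) : ∀ (m : Int) (cnt : PySem.Dict Int Int) (s : List Int) (k r : Int),
    1 ≤ m → 0 ≤ k → s.Pairwise (· ≤ ·) →
    (∀ x ∈ s, m ≤ x ∧ x < m + fuel) →
    (∀ key, m ≤ key → cnt.getD key 0 = (s.count key : Int)) →
    findLeastLoopA cnt (PySem.List.pyRange m (m + fuel) 1) k r = findLeastLoopB s k r := by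
  induction fuel with
  | zero =>
    intro m cnt s k r hm hk hp hb hc
    have hs : s = [] := by
      cases s with
      | nil => rfl
      | cons a t =>
        have := hb a (List.mem_cons_self)
        simp at this; omega
    subst hs
    simp [PySem.List.pyRange, findLeastLoopA, findLeastLoopB]
  | succ fuel ih =>
    intro m cnt s k r hm hk hp hb hc
    obtain ⟨t, hst, hpt, hbt, hct⟩ := sorted_split m s hp (fun x hx => (hb x hx).1)
    have hrange : PySem.List.pyRange m (m + (fuel + 1 : Nat)) 1 =
        m :: PySem.List.pyRange (m + 1) (m + (fuel + 1 : Nat)) 1 :=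
      PySem.List.pyRange_one_cons (by push_cast; omega)
    rw [hrange, findLeastLoopA, hc m le_rfl]
    conv_rhs => rw [hst]
    rw [loopB_replicate (s.count m) m k r t hk hm]
    by_cases hcase : m * ((s.count m : Nat) : Int) ≤ k
    · rw [if_pos hcase, if_pos hcase,
        show m + ((fuel + 1 : Nat) : Int) = (m + 1) + (fuel : Int) from by push_cast; ring]
      exact ih (m + 1) cnt t (k - m * (s.count m : Int)) (r - (s.count m : Int))
        (by omega) (by nlinarith [Int.natCast_nonneg (s.count m)]) hpt
        (fun x hx => ⟨hbt x hx, by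
          have h := (hb x (by rw [hst]; exact List.mem_append_right _ hx)).2
          push_cast at h ⊢
          omega⟩)
        (fun key hkey => by rw [hc key (by omega), hct key (by omega)])
    · rw [if_neg hcase, if_neg hcase]

-- facts about the frequency list of Counter(arr)
lemma values_counter_eq (arr : List Int) :
    (PySem.Dict.counter arr).values = (PySem.Set.ofList arr).map (fun x => (arr.count x : Int)) := by
  simp only [PySem.Dict.values, PySem.Dict.items_counter arr, List.map_map]
  rfl

lemma mem_values_counter (arr : List Int) (v : Int) (hv : v ∈ (PySem.Dict.counter arr).values) :
    1 ≤ v ∧ v ≤ (arr.length : Int) := by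
  rw [values_counter_eq] at hv
  obtain ⟨x, hx, rfl⟩ := List.mem_map.mp hv
  have hxa : x ∈ arr := (PySem.Set.mem_ofList arr x).mp hx
  have h1 : 0 < arr.count x := List.count_pos_iff.mpr hxa
  have h2 : arr.count x ≤ arr.length := List.count_le_length
  constructor
  · exact_mod_cast h1
  · exact_mod_cast h2

lemma size_counter_eq (arr : List Int) (s : List Int)
    (hperm : s.Perm (PySem.Dict.counter arr).values) :
    ((PySem.Dict.counter arr).size : Int) = (s.length : Int) := by
  have h1 : s.length = (PySem.Dict.counter arr).values.length := hperm.length_eq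
  have h2 : (PySem.Dict.counter arr).values.length = (PySem.Dict.counter arr).size := by
    simp [PySem.Dict.values, PySem.Dict.size]
  rw [h1, h2]

lemma findLeast_eq_alt (arr : List Int) (k : Int) (hk : 0 ≤ k) :
    findLeast arr k = findLeast_alt arr k := by
  simp only [findLeast, findLeast_alt]
  have hperm := PySem.List.sorted_perm (PySem.Dict.counter arr).values (fun x => x) false
  rw [size_counter_eq arr _ hperm,
    show ((arr.length : Int) + 1) = 1 + (arr.length : Int) from by ring,
    show (1 : Int) + (arr.length : Int) = 1 + ((arr.length : Nat) : Int) from rfl]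
  apply loop_main arr.length 1 _ _ k _ le_rfl hk
  · have := PySem.List.sorted_pairwise (PySem.Dict.counter arr).values (fun x => x)
    simpa using this
  · intro x hx
    have hxv := (PySem.List.mem_sorted (PySem.Dict.counter arr).values (fun x => x) false x).mp hx
    have := mem_values_counter arr x hxv
    omega
  · intro key _
    rw [PySem.Dict.getD_counter, hperm.count_eq]

-- the changed region: A adds -k on nonempty arr with k < 0, B ignores the budget
lemma findLeast_neg (arr : List Int) (k : Int) (hk : k < 0) (ha : arr ≠ []) :
    findLeast arr k = ((PySem.Dict.counter arr).size : Int) - k := by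
  simp only [findLeast]
  have hlen : 0 < arr.length := List.length_pos_iff.mpr ha
  have hrange : PySem.List.pyRange 1 ((arr.length : Int) + 1) 1 =
      1 :: PySem.List.pyRange 2 ((arr.length : Int) + 1) 1 :=
    PySem.List.pyRange_one_cons (by omega)
  rw [hrange, findLeastLoopA]
  have hc0 : 0 ≤ (PySem.Dict.counter (PySem.Dict.counter arr).values).getD 1 0 := by
    rw [PySem.Dict.getD_counter]
    exact Int.natCast_nonneg _
  rw [if_neg (by omega)]
  have h1 : PySem.Int.floordiv k 1 = k := by
    rw [PySem.Int.floordiv_eq_ediv_of_pos one_pos, Int.ediv_one]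
  rw [h1]

lemma findLeast_alt_neg (arr : List Int) (k : Int) (hk : k < 0) (ha : arr ≠ []) :
    findLeast_alt arr k = ((PySem.Dict.counter arr).size : Int) := by
  simp only [findLeast_alt]
  have hperm := PySem.List.sorted_perm (PySem.Dict.counter arr).values (fun x => x) false
  rw [size_counter_eq arr _ hperm]
  have hvne : (PySem.Dict.counter arr).values ≠ [] := by
    rw [values_counter_eq]
    simp only [ne_eq, List.map_eq_nil_iff]
    intro h
    cases harr : arr with
    | nil => exact ha harr
    | cons a tl =>
      have : a ∈ PySem.Set.ofList arr := (PySem.Set.mem_ofList arr a).mpr (by rw [harr]; exact List.mem_cons_self)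
      rw [h] at this
      exact absurd this List.not_mem_nil
  cases hsc : PySem.List.sorted (PySem.Dict.counter arr).values (fun x => x) false with
  | nil =>
    exact absurd ((PySem.List.sorted_eq_nil_iff (PySem.Dict.counter arr).values (fun x => x) false).mp hsc) hvne
  | cons f rest =>
    have hf : f ∈ (PySem.Dict.counter arr).values :=
      (PySem.List.mem_sorted (PySem.Dict.counter arr).values (fun x => x) false f).mp
        (hsc ▸ List.mem_cons_self)
    have := mem_values_counter arr f hf
    rw [findLeastLoopB, if_neg (by omega)]

-- ===== VERDICT (by name: the statement is the Claim_ definition above) =====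
theorem findLeast_spec : Claim_unchanged_findLeast := by
  intro arr k _ hD
  by_cases hk : 0 ≤ k
  · exact findLeast_eq_alt arr k hk
  · have ha : arr = [] := by
      by_contra hne
      exact hD (show D_findLeast arr k from ⟨by omega, hne⟩)
    subst ha
    rfl

theorem findLeast_changed : Claim_changed_findLeast := by
  unfold Claim_changed_findLeast; decide

theorem findLeast_tight : Claim_exact_findLeast := by
  intro arr k _ hD
  obtain ⟨hk, ha⟩ := hD
  rw [findLeast_neg arr k hk ha, findLeast_alt_neg arr k hk ha]
  omega
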